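-- pv_equiv track=rewrite | github.com/DALGO-202501-SEC1-G2/Proyecto_1 | Prototipo.py | encontrar_mejor_swap
-- ===== SOURCE A (Python) =====
-- def swap(lista: list, j: int, pos_mayor: int, pos_menor:int):
--
--     if pos_mayor < j-1:
--
--         while pos_mayor < j-1:
--
--             mayor_value = lista[pos_mayor]
--             lista[pos_mayor] = lista[pos_mayor+1]
--             lista[pos_mayor+1] = mayor_value
--             pos_mayor += 1
--
--     if pos_menor > j:
--
--         while pos_menor >j:
--
--             menor_value = lista[pos_menor]
--             lista[pos_menor] = lista[pos_menor-1]
--             lista[pos_menor-1] = menor_value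
--             pos_menor -= 1
--
--     mayor_value = lista[j-1]
--     lista[j-1] = lista[j]
--     lista[j] = mayor_value
--
--     return lista
--
-- def encontrar_mejor_swap(lista: list, m: int, j: int):
--
--     mayor_diferencia = 0
--     mejor_posicion_swap = -1
--     if (m > j):
--         for i in range(0, j):
--             #Revisamos que el extremo a intercambiar este en la lista
--             if i + m < len(lista):
--                 diferencia_actual = lista[i] - lista[i+m]
--                 if diferencia_actual > mayor_diferencia:
--                     mayor_diferencia = diferencia_actual
--                     mejor_posicion_swap = i
--     else:
--         for i in range(j-m, j):
--             if i + m < len(lista):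
--                 diferencia_actual = lista[i] - lista[i+m]
--                 if diferencia_actual > mayor_diferencia:
--                     mayor_diferencia = diferencia_actual
--                     mejor_posicion_swap = i
--     if mejor_posicion_swap > -1:
--         nueva_lista = lista.copy()
--         swap(nueva_lista, j, mejor_posicion_swap, mejor_posicion_swap+m)
--         return nueva_lista
--     else:
--         return lista
-- ===== SOURCE B (Python) =====
-- def encontrar_mejor_swap(lista, m, j):
--     lo = max(0, j - m)
--     hi = min(j, len(lista) - m)
--     mejor = max(((lista[i] - lista[i + m], -i) for i in range(lo, hi)), default=(0, 0))
--     if mejor[0] <= 0: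
--         return lista
--     p = -mejor[1]
--     return lista[:p] + lista[p+1:j] + [lista[p+m], lista[p]] + lista[j:p+m] + lista[p+m+1:]
-- ===== Notes on version B (the rewrite author's own statement) =====
-- stated objective: simpler
-- what changed: The two guarded branch loops become one max() over a single trimmed index range with lexicographic tie-breaking, and the bubble-shift swap helper with its two while-loops is replaced by direct slice concatenation of the result.
import Mathlib
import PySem

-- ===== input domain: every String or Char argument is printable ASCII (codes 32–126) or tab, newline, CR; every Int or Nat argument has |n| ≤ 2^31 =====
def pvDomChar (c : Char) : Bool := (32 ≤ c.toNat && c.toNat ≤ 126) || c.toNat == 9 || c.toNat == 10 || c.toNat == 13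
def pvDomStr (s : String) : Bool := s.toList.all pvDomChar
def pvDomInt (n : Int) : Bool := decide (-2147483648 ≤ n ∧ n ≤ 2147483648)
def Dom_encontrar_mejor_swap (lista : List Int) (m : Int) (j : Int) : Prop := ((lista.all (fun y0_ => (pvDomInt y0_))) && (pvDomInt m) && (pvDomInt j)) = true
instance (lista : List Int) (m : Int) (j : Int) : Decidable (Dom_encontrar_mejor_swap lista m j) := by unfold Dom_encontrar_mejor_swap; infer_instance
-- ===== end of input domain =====

-- B replaces A's two guarded scan loops by one max() over a trimmed index range and A's
-- bubble-shift swap helper by direct slice concatenation (objective: simpler).  A mutates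
-- only a private copy of `lista`; return-value equivalence is the whole story.

-- ===== PORT A =====

-- body of both scan loops of A: guard `i + m < len(lista)`, then the strict max update
def pvStepA (lista : List Int) (m : Int) (s : Int × Int) (i : Int) : Int × Int :=
  if i + m < (lista.length : Int) then
    if PySem.List.pyGetD lista i 0 - PySem.List.pyGetD lista (i + m) 0 > s.1 then
      (PySem.List.pyGetD lista i 0 - PySem.List.pyGetD lista (i + m) 0, i)
    else s
  else s

-- `while pos_mayor < j-1: swap lista[pos_mayor], lista[pos_mayor+1]; pos_mayor += 1`
def pvBubbleUp (l : List Int) (pos jm1 : Int) : List Int :=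
  if _h : pos < jm1 then
    pvBubbleUp
      (PySem.List.pySetD (PySem.List.pySetD l pos (PySem.List.pyGetD l (pos + 1) 0))
        (pos + 1) (PySem.List.pyGetD l pos 0)) (pos + 1) jm1
  else l
termination_by (jm1 - pos).toNat
decreasing_by omega

-- `while pos_menor > j: swap lista[pos_menor], lista[pos_menor-1]; pos_menor -= 1`
def pvBubbleDown (l : List Int) (pos j : Int) : List Int :=
  if _h : pos > j then
    pvBubbleDown
      (PySem.List.pySetD (PySem.List.pySetD l pos (PySem.List.pyGetD l (pos - 1) 0))
        (pos - 1) (PySem.List.pyGetD l pos 0)) (pos - 1) j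
  else l
termination_by (pos - j).toNat
decreasing_by omega

-- the helper `swap` of A, ported as list-returning (it mutates the copied list in Python)
def pvSwapA (lista : List Int) (j pos_mayor pos_menor : Int) : List Int :=
  PySem.List.pySetD
    (PySem.List.pySetD (pvBubbleDown (pvBubbleUp lista pos_mayor (j - 1)) pos_menor j) (j - 1)
      (PySem.List.pyGetD (pvBubbleDown (pvBubbleUp lista pos_mayor (j - 1)) pos_menor j) j 0))
    j (PySem.List.pyGetD (pvBubbleDown (pvBubbleUp lista pos_mayor (j - 1)) pos_menor j) (j - 1) 0)

def encontrar_mejor_swap (lista : List Int) (m : Int) (j : Int) : List Int :=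
  let r :=
    if m > j then (PySem.List.pyRange 0 j 1).foldl (pvStepA lista m) (0, -1)
    else (PySem.List.pyRange (j - m) j 1).foldl (pvStepA lista m) (0, -1)
  if r.2 > -1 then pvSwapA lista j r.2 (r.2 + m) else lista

-- ===== PORT B =====

-- Python's max on int pairs: take the right one only if strictly lexicographically greater
def pvLexMax (a b : Int × Int) : Int × Int :=
  if a.1 < b.1 ∨ (a.1 = b.1 ∧ a.2 < b.2) then b else a

def encontrar_mejor_swap_alt (lista : List Int) (m : Int) (j : Int) : List Int :=
  let lo := max 0 (j - m)
  let hi := min j ((lista.length : Int) - m)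
  let cs := (PySem.List.pyRange lo hi 1).map
    (fun i => (PySem.List.pyGetD lista i 0 - PySem.List.pyGetD lista (i + m) 0, -i))
  let mejor := match cs with
    | [] => ((0 : Int), (0 : Int))
    | c :: rest => rest.foldl pvLexMax c
  if mejor.1 ≤ 0 then lista
  else
    PySem.List.slice lista none (some (-mejor.2)) ++
      PySem.List.slice lista (some (-mejor.2 + 1)) (some j) ++
      [PySem.List.pyGetD lista (-mejor.2 + m) 0, PySem.List.pyGetD lista (-mejor.2) 0] ++
      PySem.List.slice lista (some j) (some (-mejor.2 + m)) ++
      PySem.List.slice lista (some (-mejor.2 + m + 1)) none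

-- ===== PRECONDITION & SPEC =====
def Spec_encontrar_mejor_swap (lista : List Int) (m : Int) (j : Int) (out : List Int) : Prop := out = encontrar_mejor_swap_alt lista m j
instance (lista : List Int) (m : Int) (j : Int) (out : List Int) : Decidable (Spec_encontrar_mejor_swap lista m j out) := by unfold Spec_encontrar_mejor_swap; infer_instance

-- ===== CLAIM (what is proved, stated in full; the proofs are below) =====
def Claim_equal_encontrar_mejor_swap : Prop := ∀ (lista : List Int) (m : Int) (j : Int), Dom_encontrar_mejor_swap lista m j → Spec_encontrar_mejor_swap lista m j (encontrar_mejor_swap lista m j)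

-- ===== LEMMAS AND PROOFS =====

-- ---- generic list positional helpers ----

theorem pvGetMid (P R : List Int) (x d : Int) :
    PySem.List.pyGetD (P ++ x :: R) ((P.length : Int)) d = x := by
  rw [PySem.List.pyGetD_natCast]
  simp [List.getD_eq_getElem?_getD]

theorem pvSetMid (P R : List Int) (x v : Int) :
    (P ++ x :: R).set P.length v = P ++ v :: R := by
  induction P with
  | nil => rfl
  | cons a P ih => simpa using ih

-- ---- the bubble loops of A's `swap`, characterised ----

theorem pvBubbleUp_spec : ∀ (k : Nat) (P R : List Int) (x : Int), k ≤ R.length →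
    pvBubbleUp (P ++ x :: R) (P.length : Int) ((P.length : Int) + (k : Int))
      = P ++ R.take k ++ x :: R.drop k := by
  intro k
  induction k with
  | zero =>
    intro P R x _
    rw [pvBubbleUp, dif_neg (by omega)]
    simp
  | succ k ih =>
    intro P R x hk
    match R with
    | r :: R' =>
      rw [pvBubbleUp, dif_pos (by push_cast; omega)]
      have hget1 : PySem.List.pyGetD (P ++ x :: r :: R') ((P.length : Int) + 1) 0 = r := by
        rw [show ((P.length : Int) + 1) = (((P ++ [x]).length : Nat) : Int) by
            push_cast [List.length_append, List.length_cons, List.length_nil]; ring,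
          show P ++ x :: r :: R' = (P ++ [x]) ++ r :: R' by simp]
        exact pvGetMid _ _ _ _
      have hget0 : PySem.List.pyGetD (P ++ x :: r :: R') ((P.length : Int)) 0 = x :=
        pvGetMid _ _ _ _
      rw [hget1, hget0, PySem.List.pySetD_natCast, pvSetMid]
      have hset2 : PySem.List.pySetD (P ++ r :: r :: R') ((P.length : Int) + 1) x
          = P ++ r :: x :: R' := by
        rw [show ((P.length : Int) + 1) = (((P ++ [r]).length : Nat) : Int) by
            push_cast [List.length_append, List.length_cons, List.length_nil]; ring,
          PySem.List.pySetD_natCast,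
          show P ++ r :: r :: R' = (P ++ [r]) ++ r :: R' by simp, pvSetMid]
        simp
      rw [hset2]
      rw [show P ++ r :: x :: R' = (P ++ [r]) ++ x :: R' by simp,
        show ((P.length : Int) + ((k + 1 : Nat) : Int)) = (((P ++ [r]).length : Nat) : Int) + (k : Int) by
          push_cast [List.length_append, List.length_cons, List.length_nil]; ring,
        show ((P.length : Int) + 1) = (((P ++ [r]).length : Nat) : Int) by
          push_cast [List.length_append, List.length_cons, List.length_nil]; ring]
      rw [ih (P ++ [r]) R' x (by simp at hk ⊢; omega)]
      simp

theorem pvBubbleDown_spec : ∀ (n : Nat) (S : List Int), S.length = n → ∀ (P D : List Int) (y : Int),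
    pvBubbleDown (P ++ S ++ y :: D) (((P.length + S.length : Nat)) : Int) ((P.length : Nat) : Int)
      = P ++ y :: S ++ D := by
  intro n
  induction n with
  | zero =>
    intro S hS P D y
    have : S = [] := List.length_eq_zero_iff.mp hS
    subst this
    rw [pvBubbleDown, dif_neg (by push_cast [List.length_nil]; omega)]
    simp
  | succ n ih =>
    intro S hS P D y
    rcases List.eq_nil_or_concat S with rfl | ⟨S', s, rfl⟩
    · simp at hS
    · simp only [List.concat_eq_append] at hS ⊢
      have hS' : S'.length = n := by simp at hS; omega
      rw [pvBubbleDown, dif_pos (by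
        push_cast [List.length_append, List.length_cons, List.length_nil]; omega)]
      rw [show P ++ (S' ++ [s]) ++ y :: D = (P ++ S') ++ s :: (y :: D) by simp,
        show ((P.length + (S' ++ [s]).length : Nat) : Int) = ((((P ++ S') ++ [s]).length : Nat) : Int) by
          push_cast [List.length_append, List.length_cons, List.length_nil]; ring,
        show ((((P ++ S') ++ [s]).length : Nat) : Int) - 1 = (((P ++ S').length : Nat) : Int) by
          push_cast [List.length_append, List.length_cons, List.length_nil]; ring]
      have hgpos : PySem.List.pyGetD ((P ++ S') ++ s :: (y :: D))
          ((((P ++ S') ++ [s]).length : Nat) : Int) 0 = y := by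
        rw [show (P ++ S') ++ s :: (y :: D) = ((P ++ S') ++ [s]) ++ y :: D by simp]
        exact pvGetMid _ _ _ _
      have hgpred : PySem.List.pyGetD ((P ++ S') ++ s :: (y :: D))
          (((P ++ S').length : Nat) : Int) 0 = s := pvGetMid _ _ _ _
      rw [hgpos, hgpred, PySem.List.pySetD_natCast, PySem.List.pySetD_natCast]
      rw [show (P ++ S') ++ s :: (y :: D) = ((P ++ S') ++ [s]) ++ y :: D by simp, pvSetMid]
      rw [show ((P ++ S') ++ [s]) ++ s :: D = (P ++ S') ++ s :: (s :: D) by simp, pvSetMid]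
      rw [show (((P ++ S').length : Nat) : Int) = ((P.length + S'.length : Nat) : Int) by
        push_cast [List.length_append]; ring]
      rw [ih S' hS' P (s :: D) y]
      simp

-- A's swap on a decomposed list: element x (position p) goes to slot j, element y
-- (position p+m) goes to slot j-1, everything between shifts by one.
theorem pvSwapA_spec (P B C D : List Int) (x y : Int) :
    pvSwapA (P ++ x :: (B ++ (C ++ y :: D)))
      ((P.length + B.length + 1 : Nat) : Int) ((P.length : Nat) : Int)
      ((P.length + B.length + 1 + C.length : Nat) : Int)
      = P ++ (B ++ (y :: x :: (C ++ D))) := by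
  unfold pvSwapA
  have hup : pvBubbleUp (P ++ x :: (B ++ (C ++ y :: D))) ((P.length : Nat) : Int)
      (((P.length + B.length + 1 : Nat) : Int) - 1) = (P ++ B) ++ x :: (C ++ y :: D) := by
    rw [show (((P.length + B.length + 1 : Nat) : Int) - 1) = ((P.length : Int) + ((B.length : Nat) : Int)) by
      push_cast; ring]
    rw [pvBubbleUp_spec B.length P (B ++ (C ++ y :: D)) x (by simp)]
    simp
  rw [hup]
  have hdown : pvBubbleDown ((P ++ B) ++ x :: (C ++ y :: D))
      ((P.length + B.length + 1 + C.length : Nat) : Int) ((P.length + B.length + 1 : Nat) : Int)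
      = (P ++ B) ++ x :: (y :: (C ++ D)) := by
    rw [show (P ++ B) ++ x :: (C ++ y :: D) = (P ++ B ++ [x]) ++ C ++ y :: D by simp,
      show ((P.length + B.length + 1 + C.length : Nat) : Int) = (((P ++ B ++ [x]).length + C.length : Nat) : Int) by
        push_cast [List.length_append, List.length_cons, List.length_nil]; ring,
      show ((P.length + B.length + 1 : Nat) : Int) = (((P ++ B ++ [x]).length : Nat) : Int) by
        push_cast [List.length_append, List.length_cons, List.length_nil]; ring,
      pvBubbleDown_spec C.length C rfl (P ++ B ++ [x]) D y]
    simp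
  rw [hdown]
  rw [show (((P.length + B.length + 1 : Nat) : Int) - 1) = (((P ++ B).length : Nat) : Int) by
      push_cast [List.length_append]; ring,
    show ((P.length + B.length + 1 : Nat) : Int) = ((((P ++ B) ++ [x]).length : Nat) : Int) by
      push_cast [List.length_append, List.length_cons, List.length_nil]; ring]
  have hget1 : PySem.List.pyGetD ((P ++ B) ++ x :: (y :: (C ++ D)))
      (((P ++ B).length : Nat) : Int) 0 = x := pvGetMid _ _ _ _
  have hget2 : PySem.List.pyGetD ((P ++ B) ++ x :: (y :: (C ++ D)))
      ((((P ++ B) ++ [x]).length : Nat) : Int) 0 = y := by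
    rw [show (P ++ B) ++ x :: (y :: (C ++ D)) = ((P ++ B) ++ [x]) ++ y :: (C ++ D) by simp]
    exact pvGetMid _ _ _ _
  rw [hget1, hget2, PySem.List.pySetD_natCast, PySem.List.pySetD_natCast, pvSetMid]
  rw [show ((P ++ B) ++ [x]).length = ((P ++ B) ++ [y]).length by simp]
  rw [show (P ++ B) ++ y :: (y :: (C ++ D)) = ((P ++ B) ++ [y]) ++ y :: (C ++ D) by simp, pvSetMid]
  simp

-- ---- the scan loops, characterised ----

-- scan body with the range guard removed (valid inside the trimmed range)
def pvStepU (lista : List Int) (m : Int) (s : Int × Int) (i : Int) : Int × Int :=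
  if PySem.List.pyGetD lista i 0 - PySem.List.pyGetD lista (i + m) 0 > s.1 then
    (PySem.List.pyGetD lista i 0 - PySem.List.pyGetD lista (i + m) 0, i)
  else s

-- relate A's (mayor_diferencia, mejor_posicion) state to B's running lexicographic max
def pvRel (t : Int × Int) : Int × Int := if 0 < t.1 then (t.1, -t.2) else (0, -1)

def pvLexStep (lista : List Int) (m : Int) (t : Int × Int) (i : Int) : Int × Int :=
  pvLexMax t (PySem.List.pyGetD lista i 0 - PySem.List.pyGetD lista (i + m) 0, -i)

theorem pvFoldConst (f : Int × Int → Int → Int × Int) :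
    ∀ (l : List Int) (s : Int × Int), (∀ i ∈ l, ∀ s', f s' i = s') → l.foldl f s = s := by
  intro l
  induction l with
  | nil => intro s _; rfl
  | cons a l ih =>
    intro s h
    rw [List.foldl_cons, h a (by simp), ih s (fun i hi s' => h i (by simp [hi]) s')]

theorem pvFoldCongr (f g : Int × Int → Int → Int × Int) :
    ∀ (l : List Int) (s : Int × Int), (∀ s' i, i ∈ l → f s' i = g s' i) →
      l.foldl f s = l.foldl g s := by
  intro l
  induction l with
  | nil => intro s _; rfl
  | cons a l ih =>
    intro s h
    rw [List.foldl_cons, List.foldl_cons, h s a (by simp),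
      ih _ (fun s' i hi => h s' i (by simp [hi]))]

-- guard removal + trimming: A's guarded fold over [lo, j) is the unguarded fold over [lo, hi)
theorem pvTrim (lista : List Int) (m j : Int) (s : Int × Int) :
    (PySem.List.pyRange (max 0 (j - m)) j 1).foldl (pvStepA lista m) s
      = (PySem.List.pyRange (max 0 (j - m)) (min j ((lista.length : Int) - m)) 1).foldl (pvStepU lista m) s := by
  set lo := max 0 (j - m) with hlo
  set hi := min j ((lista.length : Int) - m) with hhi
  rcases (show j ≤ lo ∨ lo < j by omega) with h | h
  · rw [PySem.List.pyRange_one_eq_nil h, PySem.List.pyRange_one_eq_nil (by omega),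
      List.foldl_nil, List.foldl_nil]
  · rcases (show hi ≤ lo ∨ lo < hi by omega) with h2 | h2
    · rw [PySem.List.pyRange_one_eq_nil h2, List.foldl_nil]
      refine pvFoldConst _ _ s ?_
      intro i hi_mem s'
      have hmem := (PySem.List.mem_pyRange_one).mp hi_mem
      have hguard : ¬ (i + m < (lista.length : Int)) := by omega
      simp only [pvStepA, if_neg hguard]
    · have hij : hi ≤ j := by omega
      rw [PySem.List.pyRange_one_append lo hi j (le_of_lt h2) hij, List.foldl_append]
      have hcong : (PySem.List.pyRange lo hi 1).foldl (pvStepA lista m) s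
          = (PySem.List.pyRange lo hi 1).foldl (pvStepU lista m) s := by
        refine pvFoldCongr _ _ _ s ?_
        intro s' i hi_mem
        have hmem := (PySem.List.mem_pyRange_one).mp hi_mem
        have hguard : i + m < (lista.length : Int) := by omega
        simp only [pvStepA, pvStepU, if_pos hguard]
      rw [hcong]
      rcases eq_or_lt_of_le hij with he | hlt
      · rw [he, PySem.List.pyRange_one_eq_nil (le_refl j), List.foldl_nil]
      · refine pvFoldConst _ _ _ ?_
        intro i hi_mem s'
        have hmem := (PySem.List.mem_pyRange_one).mp hi_mem
        have hguard : ¬ (i + m < (lista.length : Int)) := by omega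
        simp only [pvStepA, if_neg hguard]

-- the invariant: A's fold state is pvRel of B's running max, whose recorded position
-- lies in [lo, a)
theorem pvScanRel (lista : List Int) (m lo : Int) :
    ∀ (n : Nat) (a b : Int), (b - a).toNat = n → lo ≤ a →
    ∀ t : Int × Int, (0 < t.1 → lo ≤ -t.2 ∧ -t.2 < a) →
    (PySem.List.pyRange a b 1).foldl (pvStepU lista m) (pvRel t)
        = pvRel ((PySem.List.pyRange a b 1).foldl (pvLexStep lista m) t)
      ∧ (0 < ((PySem.List.pyRange a b 1).foldl (pvLexStep lista m) t).1 →
          lo ≤ -((PySem.List.pyRange a b 1).foldl (pvLexStep lista m) t).2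
            ∧ -((PySem.List.pyRange a b 1).foldl (pvLexStep lista m) t).2 < max a b) := by
  intro n
  induction n with
  | zero =>
    intro a b hn ha t ht
    rw [PySem.List.pyRange_one_eq_nil (by omega)]
    refine ⟨rfl, fun h => ⟨(ht h).1, lt_of_lt_of_le (ht h).2 (le_max_left _ _)⟩⟩
  | succ n ih =>
    intro a b hn ha t ht
    have hab : a < b := by omega
    rw [PySem.List.pyRange_one_cons hab, List.foldl_cons, List.foldl_cons]
    have hstep : pvStepU lista m (pvRel t) a = pvRel (pvLexStep lista m t a) := by
      rcases (show t.1 ≤ 0 ∨ 0 < t.1 by omega) with h0 | h0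
      · have hrt : pvRel t = (0, -1) := by simp only [pvRel, if_neg (by omega : ¬ (0 : Int) < t.1)]
        rcases (show PySem.List.pyGetD lista a 0 - PySem.List.pyGetD lista (a + m) 0 ≤ 0 ∨
            0 < PySem.List.pyGetD lista a 0 - PySem.List.pyGetD lista (a + m) 0 by omega) with hd | hd
        · have h1 : pvStepU lista m (pvRel t) a = (0, -1) := by
            rw [hrt]; simp only [pvStepU]; rw [if_neg (by simp; omega)]
          have h2 : pvRel (pvLexStep lista m t a) = (0, -1) := by
            simp only [pvLexStep, pvLexMax]
            split_ifs with hcond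
            · simp only [pvRel]; rw [if_neg (by simp; omega)]
            · simp only [pvRel]; rw [if_neg (by omega)]
          rw [h1, h2]
        · have h1 : pvStepU lista m (pvRel t) a
              = (PySem.List.pyGetD lista a 0 - PySem.List.pyGetD lista (a + m) 0, a) := by
            rw [hrt]; simp only [pvStepU]; rw [if_pos (by simp; omega)]
          have h2 : pvRel (pvLexStep lista m t a)
              = (PySem.List.pyGetD lista a 0 - PySem.List.pyGetD lista (a + m) 0, a) := by
            simp only [pvLexStep, pvLexMax]
            rw [if_pos (Or.inl (by omega))]
            simp only [pvRel]
            rw [if_pos (by simp; omega)]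
            simp
          rw [h1, h2]
      · have hrt : pvRel t = (t.1, -t.2) := by simp only [pvRel, if_pos h0]
        obtain ⟨hta1, hta2⟩ := ht h0
        rcases (show PySem.List.pyGetD lista a 0 - PySem.List.pyGetD lista (a + m) 0 ≤ t.1 ∨
            t.1 < PySem.List.pyGetD lista a 0 - PySem.List.pyGetD lista (a + m) 0 by omega) with hd | hd
        · have h1 : pvStepU lista m (pvRel t) a = (t.1, -t.2) := by
            rw [hrt]; simp only [pvStepU]; rw [if_neg (by simp; omega)]
          have h2 : pvRel (pvLexStep lista m t a) = (t.1, -t.2) := by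
            simp only [pvLexStep, pvLexMax]
            rw [if_neg (by rintro (h | ⟨h, h'⟩) <;> simp_all <;> omega)]
            simp only [pvRel]; rw [if_pos h0]
          rw [h1, h2]
        · have h1 : pvStepU lista m (pvRel t) a
              = (PySem.List.pyGetD lista a 0 - PySem.List.pyGetD lista (a + m) 0, a) := by
            rw [hrt]; simp only [pvStepU]; rw [if_pos (by simp; omega)]
          have h2 : pvRel (pvLexStep lista m t a)
              = (PySem.List.pyGetD lista a 0 - PySem.List.pyGetD lista (a + m) 0, a) := by
            simp only [pvLexStep, pvLexMax]
            rw [if_pos (Or.inl (by omega))]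
            simp only [pvRel]
            rw [if_pos (by simp; omega)]
            simp
          rw [h1, h2]
    rw [hstep]
    have ht' : 0 < (pvLexStep lista m t a).1 →
        lo ≤ -(pvLexStep lista m t a).2 ∧ -(pvLexStep lista m t a).2 < a + 1 := by
      simp only [pvLexStep, pvLexMax]
      split_ifs with h
      · intro _; refine ⟨by simp <;> omega, by simp <;> omega⟩
      · intro h1; exact ⟨(ht h1).1, by have := (ht h1).2; omega⟩
    obtain ⟨he, hb⟩ := ih (a + 1) b (by omega) (by omega) (pvLexStep lista m t a) ht'
    exact ⟨he, fun h => ⟨(hb h).1, by have := (hb h).2; omega⟩⟩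

-- ---- folding Python's max into the (0,0)-seeded running max ----

theorem pvLexMax_assoc (a b c : Int × Int) :
    pvLexMax (pvLexMax a b) c = pvLexMax a (pvLexMax b c) := by
  rcases a with ⟨a1, a2⟩; rcases b with ⟨b1, b2⟩; rcases c with ⟨c1, c2⟩
  simp only [pvLexMax]
  split_ifs <;> first
    | rfl
    | (simp only [Prod.mk.injEq] at * ; omega)

theorem pvLexFoldComm (a : Int × Int) :
    ∀ (l : List (Int × Int)) (b : Int × Int),
      l.foldl pvLexMax (pvLexMax a b) = pvLexMax a (l.foldl pvLexMax b) := by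
  intro l
  induction l with
  | nil => intro b; rfl
  | cons x l ih =>
    intro b
    rw [List.foldl_cons, List.foldl_cons, pvLexMax_assoc, ih]

-- ---- decomposing the list around positions p, j-1/j, p+m ----

theorem pvDecompE (l : List Int) (pN jN qN : Nat) (h1 : pN < jN) (h2 : jN ≤ qN) (h3 : qN < l.length) :
    ∃ (P B C D : List Int) (x y : Int),
      l = P ++ x :: (B ++ (C ++ y :: D)) ∧ P.length = pN ∧ B.length = jN - 1 - pN ∧
        C.length = qN - jN ∧ x = l[pN] ∧ y = l[qN] ∧
        P = l.take pN ∧ B = (l.drop (pN + 1)).take (jN - 1 - pN) ∧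
        C = (l.drop jN).take (qN - jN) ∧ D = l.drop (qN + 1) := by
  refine ⟨l.take pN, (l.drop (pN + 1)).take (jN - 1 - pN), (l.drop jN).take (qN - jN),
    l.drop (qN + 1), l[pN], l[qN], ?_, ?_, ?_, ?_, rfl, rfl, rfl, rfl, rfl, rfl⟩
  · have e1 : l.drop pN = l[pN] :: l.drop (pN + 1) := List.drop_eq_getElem_cons (by omega)
    have e4 : l.drop qN = l[qN] :: l.drop (qN + 1) := List.drop_eq_getElem_cons h3
    have e3 : l.drop jN = (l.drop jN).take (qN - jN) ++ l[qN] :: l.drop (qN + 1) := by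
      conv_lhs => rw [← List.take_append_drop (qN - jN) (l.drop jN)]
      rw [List.drop_drop, show jN + (qN - jN) = qN by omega, e4]
    have e2 : l.drop (pN + 1) = (l.drop (pN + 1)).take (jN - 1 - pN) ++ l.drop jN := by
      conv_lhs => rw [← List.take_append_drop (jN - 1 - pN) (l.drop (pN + 1))]
      rw [List.drop_drop, show pN + 1 + (jN - 1 - pN) = jN by omega]
    conv_lhs => rw [← List.take_append_drop pN l, e1, e2, e3]
  · exact List.length_take_of_le (by omega)
  · rw [List.length_take, List.length_drop]; omega
  · rw [List.length_take, List.length_drop]; omega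

-- ===== MAIN PROOF =====

theorem pv_main (lista : List Int) (m j : Int) :
    encontrar_mejor_swap lista m j = encontrar_mejor_swap_alt lista m j := by
  unfold encontrar_mejor_swap encontrar_mejor_swap_alt
  simp only []
  set lo := max 0 (j - m) with hlo
  set hi := min j ((lista.length : Int) - m) with hhi
  have hbranch :
      (if m > j then (PySem.List.pyRange 0 j 1).foldl (pvStepA lista m) (0, -1)
       else (PySem.List.pyRange (j - m) j 1).foldl (pvStepA lista m) (0, -1))
      = (PySem.List.pyRange lo j 1).foldl (pvStepA lista m) (0, -1) := by
    split_ifs with h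
    · rw [show lo = 0 by omega]
    · rw [show lo = j - m by omega]
  rw [hbranch, pvTrim]
  rw [show ((0 : Int), (-1 : Int)) = pvRel (0, 0) by simp [pvRel]]
  obtain ⟨heq, hbound⟩ := pvScanRel lista m lo ((hi - lo).toNat) lo hi rfl le_rfl (0, 0)
    (by intro h; exact absurd h (by norm_num))
  rw [heq]
  set M := (PySem.List.pyRange lo hi 1).foldl (pvLexStep lista m) (0, 0) with hM
  have hcs : ((PySem.List.pyRange lo hi 1).map
      (fun i => (PySem.List.pyGetD lista i 0 - PySem.List.pyGetD lista (i + m) 0, -i))).foldl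
      pvLexMax ((0 : Int), (0 : Int)) = M := by
    rw [List.foldl_map, hM]
    exact pvFoldCongr _ _ _ _ (fun s i _ => rfl)
  rcases (show hi ≤ lo ∨ lo < hi by omega) with hrange | hrange
  · rw [PySem.List.pyRange_one_eq_nil hrange] at hM ⊢
    have hM0 : M = ((0 : Int), (0 : Int)) := hM
    rw [hM0]
    simp [pvRel]
  · rw [PySem.List.pyRange_one_cons hrange]
    simp only [List.map_cons]
    set mejor := (((PySem.List.pyRange (lo + 1) hi 1).map
      (fun i => (PySem.List.pyGetD lista i 0 - PySem.List.pyGetD lista (i + m) 0, -i))).foldl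
      pvLexMax (PySem.List.pyGetD lista lo 0 - PySem.List.pyGetD lista (lo + m) 0, -lo)) with hmejor
    have hMm : M = pvLexMax (0, 0) mejor := by
      rw [← hcs, PySem.List.pyRange_one_cons hrange, List.map_cons, List.foldl_cons, hmejor]
      exact pvLexFoldComm (0, 0) _ _
    rcases (show mejor.1 ≤ 0 ∨ 0 < mejor.1 by omega) with hmej | hmej
    · have hM1 : ¬ (0 < M.1) := by
        rw [hMm]
        simp only [pvLexMax]
        split_ifs <;> simp <;> omega
      rw [show pvRel M = ((0 : Int), (-1 : Int)) by simp only [pvRel, if_neg hM1]]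
      rw [if_neg (by norm_num), if_pos hmej]
    · have h00 : ((0 : Int), (0 : Int)).1 < mejor.1 := by simpa using hmej
      have hMm' : M = mejor := by
        rw [hMm]; simp only [pvLexMax]; rw [if_pos (Or.inl h00)]
      have hM1 : 0 < M.1 := by rw [hMm']; exact hmej
      obtain ⟨hplo, hphimax⟩ := hbound hM1
      have hphi : -M.2 < hi := by omega
      rw [show (pvRel M).2 = -M.2 from by simp only [pvRel]; rw [if_pos hM1]]
      rw [if_pos (show -M.2 > -1 by omega)]
      rw [if_neg (show ¬ mejor.1 ≤ 0 by omega)]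
      rw [← hMm']
      -- the found position p := -M.2, with its bounds
      set p := -M.2 with hpdef
      have hp0 : 0 ≤ p := by omega
      have hpj : p < j := by omega
      have hjq : j ≤ p + m := by omega
      have hqlen : p + m < (lista.length : Int) := by
        have h2 : hi ≤ (lista.length : Int) - m := by rw [hhi]; exact min_le_right _ _
        have h3 : p < (lista.length : Int) - m := lt_of_lt_of_le hphi h2
        exact lt_sub_iff_add_lt.mp h3
      have hpN : ((p.toNat : Nat) : Int) = p := Int.toNat_of_nonneg hp0
      have hjN : ((j.toNat : Nat) : Int) = j := Int.toNat_of_nonneg (by omega)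
      have hqN : (((p + m).toNat : Nat) : Int) = p + m := Int.toNat_of_nonneg (by omega)
      have hN1 : p.toNat < j.toNat := by omega
      have hN2 : j.toNat ≤ (p + m).toNat := by omega
      have hN3 : (p + m).toNat < lista.length := by
        have h4 : (((p + m).toNat : Nat) : Int) < ((lista.length : Nat) : Int) := by
          rw [hqN]; exact hqlen
        exact_mod_cast h4
      obtain ⟨P, B, C, D, x, y, hdec, hPl, hBl, hCl, hx, hy, hPd, hBd, hCd, hDd⟩ :=
        pvDecompE lista p.toNat j.toNat (p + m).toNat hN1 hN2 hN3
      have hA : pvSwapA lista j p (p + m) = P ++ (B ++ (y :: x :: (C ++ D))) := by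
        rw [show p + m = ((P.length + B.length + 1 + C.length : Nat) : Int) by
            rw [← hqN]; congr 1; omega,
          show j = ((P.length + B.length + 1 : Nat) : Int) by rw [← hjN]; congr 1; omega,
          show p = ((P.length : Nat) : Int) by rw [← hpN]; congr 1; omega]
        conv_lhs => rw [hdec]
        exact pvSwapA_spec P B C D x y
      rw [hA]
      have hs1 : PySem.List.slice lista none (some p) = P := by
        rw [← hpN, PySem.List.slice_to_natCast, hPd]
      have hs2 : PySem.List.slice lista (some (p + 1)) (some j) = B := by
        rw [← hpN, ← hjN, show (((p.toNat : Nat) : Int) + 1) = ((p.toNat + 1 : Nat) : Int) by omega,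
          PySem.List.slice_natCast, hBd]
        congr 1
        omega
      have hs3 : PySem.List.slice lista (some j) (some (p + m)) = C := by
        rw [← hjN, ← hqN, PySem.List.slice_natCast, hCd]
      have hs4 : PySem.List.slice lista (some (p + m + 1)) none = D := by
        rw [← hqN, show ((((p + m).toNat : Nat) : Int) + 1) = (((p + m).toNat + 1 : Nat) : Int) by omega,
          PySem.List.slice_from_natCast, hDd]
      have hg1 : PySem.List.pyGetD lista (p + m) 0 = y := by
        rw [← hqN, PySem.List.pyGetD_natCast, hy]
        exact List.getD_eq_getElem _ _ hN3
      have hg2 : PySem.List.pyGetD lista p 0 = x := by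
        rw [← hpN, PySem.List.pyGetD_natCast, hx]
        exact List.getD_eq_getElem _ _ (by omega)
      rw [hs1, hs2, hs3, hs4, hg1, hg2]
      simp

-- ===== VERDICT (by name: the statement is the Claim_ definition above) =====
theorem encontrar_mejor_swap_spec : Claim_equal_encontrar_mejor_swap := by
  intro lista m j _
  unfold Spec_encontrar_mejor_swap
  exact pv_main lista m j
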